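-- pv_equiv track=rewrite | github.com/manas-17045/LeetcodeSolutions | Leetcode 3801-3900/3853/3853.py | mergeCharacters
-- ===== SOURCE A (Python) =====
-- def mergeCharacters(s: str, k: int) -> str:
--     """
--     Merges identical characters in a string if they are within a distance of k.
--
--     :param s: The input string to process.
--     :param k: The maximum distance between two identical characters to allow a merge.
--     :return: The resulting string after all possible merges are performed.
--     """
--     stringList = list(s)
--
--     while True:
--         hasMerged = False
--         listLen = len(stringList)
--         for leftIndex in range(listLen):
--             for rightIndex in range(leftIndex + 1, min(leftIndex + k + 1, listLen)):
--                 if stringList[leftIndex] == stringList[rightIndex]: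
--                     stringList.pop(rightIndex)
--                     hasMerged = True
--                     break
--
--             if hasMerged:
--                 break
--
--         if not hasMerged:
--             break
--
--     return "".join(stringList)
-- ===== SOURCE B (Python) =====
-- def mergeCharacters(s: str, k: int) -> str:
--     """One left-to-right pass: keep a character only if it does not equal any
--     kept character among the last k kept ones; O(n*k) instead of restarting scans."""
--     out = []
--     for c in s:
--         start = len(out) - k
--         if start < 0:
--             start = 0
--         if c not in out[start:]:
--             out.append(c)
--     return "".join(out)
-- ===== Notes on version B (the rewrite author's own statement) =====
-- stated objective: faster
-- what changed: A repeatedly rescans the whole list from index 0 after every single merge until a fixpoint; B does one left-to-right pass keeping a character only if it does not occur among the last k kept characters, which yields the same fixpoint.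
import Mathlib
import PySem

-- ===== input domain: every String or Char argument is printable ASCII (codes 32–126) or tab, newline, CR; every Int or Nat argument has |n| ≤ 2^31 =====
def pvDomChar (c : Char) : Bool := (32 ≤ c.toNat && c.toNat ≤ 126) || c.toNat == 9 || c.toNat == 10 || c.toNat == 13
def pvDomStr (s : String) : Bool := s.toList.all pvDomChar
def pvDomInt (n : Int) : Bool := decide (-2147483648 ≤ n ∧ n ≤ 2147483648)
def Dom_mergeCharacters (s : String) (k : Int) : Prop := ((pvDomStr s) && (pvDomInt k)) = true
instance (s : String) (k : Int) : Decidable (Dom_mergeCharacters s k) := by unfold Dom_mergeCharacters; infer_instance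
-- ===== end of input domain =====

-- B replaces A's restart-from-zero merge loop by a single left-to-right pass that keeps a
-- character only if it is absent from the last k kept ones (objective: faster; return value only).

-- ===== PORT A =====
-- inner `for rightIndex in range(leftIndex+1, stop)` loop, driven by its exact trip
-- count `stop - (l+1)` (structural fuel); on a match it pops rightIndex (always in
-- range when called from pvFind, so `pop` = eraseIdx) and breaks out of both loops
-- (modelled by returning `some`).
def pvInner (lst : List Char) (l r fuel : Nat) : Option (List Char) :=
  match fuel with
  | 0 => none
  | fuel' + 1 =>
      if lst[l]? = lst[r]? then some (lst.eraseIdx r)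
      else pvInner lst l (r+1) fuel'

-- outer `for leftIndex in range(listLen)` loop (trip count = listLen - l);
-- `min(leftIndex+k+1, listLen)` is Int arithmetic; `.toNat` is exact here since
-- r ≥ l+1 ≥ 1 makes a negative bound an empty range either way.
def pvFind (k : Int) (lst : List Char) (l fuel : Nat) : Option (List Char) :=
  match fuel with
  | 0 => none
  | fuel' + 1 =>
      match pvInner lst l (l+1) ((min ((l:Int) + k + 1) (lst.length:Int)).toNat - (l+1)) with
      | some t => some t
      | none => pvFind k lst (l+1) fuel'

-- the `while True:` loop: repeat a full scan until no merge happened (hasMerged False);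
-- each iteration with a merge shortens the list by one, so length+1 rounds always
-- reach the fixpoint (proved in loop_eq_fold below).
def pvLoop (k : Int) (fuel : Nat) (lst : List Char) : List Char :=
  match fuel with
  | 0 => lst
  | fuel' + 1 =>
      match pvFind k lst 0 lst.length with
      | some t => pvLoop k fuel' t
      | none => lst

def mergeCharacters (s : String) (k : Int) : String :=
  String.ofList (pvLoop k (s.toList.length + 1) s.toList)

-- ===== PORT B =====
-- one step of B's pass: `start = max(len(out)-k, 0); if c not in out[start:]: out.append(c)`
-- (out[start:] with 0 ≤ start ≤ len(out) is List.drop start).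
def pvStep (k : Int) (out : List Char) (c : Char) : List Char :=
  let start : Int := (out.length : Int) - k
  let start := if start < 0 then 0 else start
  if c ∈ out.drop start.toNat then out else out ++ [c]

def mergeCharacters_alt (s : String) (k : Int) : String :=
  String.ofList (s.toList.foldl (pvStep k) [])

-- ===== PRECONDITION & SPEC =====
def Spec_mergeCharacters (s : String) (k : Int) (out : String) : Prop := out = mergeCharacters_alt s k
instance (s : String) (k : Int) (out : String) : Decidable (Spec_mergeCharacters s k out) := by unfold Spec_mergeCharacters; infer_instance

-- ===== CLAIM (what is proved, stated in full; the proofs are below) =====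
def Claim_equal_mergeCharacters : Prop := ∀ (s : String) (k : Int), Dom_mergeCharacters s k → Spec_mergeCharacters s k (mergeCharacters s k)

-- ===== LEMMAS AND PROOFS =====

lemma inner_some {lst t : List Char} {l : Nat} :
    ∀ {r fuel : Nat}, pvInner lst l r fuel = some t →
      ∃ j, r ≤ j ∧ j < r + fuel ∧ lst[l]? = lst[j]? ∧
        (∀ m, r ≤ m → m < j → lst[l]? ≠ lst[m]?) ∧ t = lst.eraseIdx j := by
  intro r fuel
  induction fuel generalizing r with
  | zero => intro h; simp [pvInner] at h
  | succ fuel ih =>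
      intro h
      rw [pvInner] at h
      split at h
      · rename_i heq
        injection h with h'
        exact ⟨r, le_rfl, by omega, heq, fun m h1 h2 => absurd h1 (by omega), h'.symm⟩
      · rename_i hne
        obtain ⟨j, h1, h2, h3, h4, h5⟩ := ih h
        exact ⟨j, by omega, by omega, h3, fun m hm1 hm2 => by
          rcases Nat.eq_or_lt_of_le hm1 with rfl | hlt
          · exact hne
          · exact h4 m hlt hm2, h5⟩

lemma inner_none {lst : List Char} {l : Nat} :
    ∀ {r fuel : Nat}, pvInner lst l r fuel = none →
      ∀ j, r ≤ j → j < r + fuel → lst[l]? ≠ lst[j]? := by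
  intro r fuel
  induction fuel generalizing r with
  | zero => intro _ j h1 h2; omega
  | succ fuel ih =>
      intro h j h1 h2
      rw [pvInner] at h
      split at h
      · cases h
      · rename_i hne
        rcases Nat.eq_or_lt_of_le h1 with rfl | hlt
        · exact hne
        · exact ih h j hlt (by omega)

-- the inner range `range(l+1, min(l+k+1, listLen))` contains j iff
-- j is within k of l and inside the list
lemma stop_iff {l j len : Nat} {k : Int} (hj : l + 1 ≤ j) :
    j < (l + 1) + ((min ((l:Int) + k + 1) (len:Int)).toNat - (l + 1)) ↔
      ((j:Int) ≤ (l:Int) + k ∧ j < len) := by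
  omega

-- A's scan finds the pair (l', r) with minimal l', then minimal r, and pops index r
lemma find_some {k : Int} {lst t : List Char} :
    ∀ {l0 fuel : Nat}, l0 + fuel = lst.length → pvFind k lst l0 fuel = some t →
      ∃ l r, l0 ≤ l ∧ l < lst.length ∧ l < r ∧ r < lst.length ∧ (r:Int) ≤ (l:Int) + k ∧
        lst[l]? = lst[r]? ∧
        (∀ i j, l0 ≤ i → i < l → i < j → (j:Int) ≤ (i:Int) + k → j < lst.length → lst[i]? ≠ lst[j]?) ∧
        (∀ m, l < m → m < r → lst[l]? ≠ lst[m]?) ∧ t = lst.eraseIdx r := by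
  intro l0 fuel
  induction fuel generalizing l0 with
  | zero => intro _ h; simp [pvFind] at h
  | succ fuel ih =>
      intro hfl h
      rw [pvFind] at h
      cases hinner : pvInner lst l0 (l0+1) ((min ((l0:Int) + k + 1) (lst.length:Int)).toNat - (l0+1)) with
      | some t' =>
          rw [hinner] at h
          injection h with h'
          obtain ⟨j, h1, h2, h3, h4, h5⟩ := inner_some hinner
          obtain ⟨hk, hlen⟩ := (stop_iff h1).mp h2
          exact ⟨l0, j, le_rfl, by omega, by omega, hlen, hk, h3,
            fun i j hi1 hi2 => absurd hi2 (by omega),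
            fun m hm1 hm2 => h4 m (by omega) hm2, h' ▸ h5⟩
      | none =>
          rw [hinner] at h
          obtain ⟨l', r, h1, h2, h3, h4, h5, h6, h7, h8, h9⟩ := ih (by omega) h
          refine ⟨l', r, by omega, h2, h3, h4, h5, h6, ?_, h8, h9⟩
          intro i j hi1 hi2 hij hjk hjlen
          rcases Nat.eq_or_lt_of_le hi1 with rfl | hlt
          · exact inner_none hinner j (by omega) ((stop_iff (by omega)).mpr ⟨hjk, hjlen⟩)
          · exact h7 i j hlt hi2 hij hjk hjlen

-- a full scan without a merge means no equal pair within distance k exists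
lemma find_none {k : Int} {lst : List Char} :
    ∀ {l0 fuel : Nat}, l0 + fuel = lst.length → pvFind k lst l0 fuel = none →
      ∀ i j, l0 ≤ i → i < lst.length → i < j → (j:Int) ≤ (i:Int) + k → j < lst.length →
        lst[i]? ≠ lst[j]? := by
  intro l0 fuel
  induction fuel generalizing l0 with
  | zero => intro hfl _ i j h1 h2; omega
  | succ fuel ih =>
      intro hfl h i j hi1 hi2 hij hjk hjlen
      rw [pvFind] at h
      cases hinner : pvInner lst l0 (l0+1) ((min ((l0:Int) + k + 1) (lst.length:Int)).toNat - (l0+1)) with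
      | some t' => rw [hinner] at h; cases h
      | none =>
          rw [hinner] at h
          rcases Nat.eq_or_lt_of_le hi1 with rfl | hlt
          · exact inner_none hinner j (by omega) ((stop_iff (by omega)).mpr ⟨hjk, hjlen⟩)
          · exact ih (by omega) h i j hlt hi2 hij hjk hjlen
-- membership in B's window `out[max(len(out)-k,0):]` in index form
lemma step_window_iff {k : Int} {out : List Char} {c : Char} :
    (c ∈ out.drop ((if (out.length : Int) - k < 0 then 0 else (out.length : Int) - k)).toNat)
      ↔ ∃ i, i < out.length ∧ (out.length : Int) ≤ (i:Int) + k ∧ out[i]? = some c := by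
  rw [List.mem_iff_getElem?]
  constructor
  · rintro ⟨j, hj⟩
    have hjlen : j < (out.drop _).length := (List.getElem?_eq_some_iff.mp hj).1
    rw [List.length_drop] at hjlen
    rw [List.getElem?_drop] at hj
    refine ⟨_ + j, by omega, by omega, hj⟩
  · rintro ⟨i, hi, hik, hc⟩
    refine ⟨i - ((if (out.length : Int) - k < 0 then 0 else (out.length : Int) - k)).toNat, ?_⟩
    rw [List.getElem?_drop]
    have : (if (out.length : Int) - k < 0 then 0 else (out.length : Int) - k).toNat ≤ i := by omega
    rwa [Nat.add_sub_cancel' this]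

lemma step_of_mem {k : Int} {out : List Char} {c : Char}
    (h : ∃ i, i < out.length ∧ (out.length : Int) ≤ (i:Int) + k ∧ out[i]? = some c) :
    pvStep k out c = out := by
  unfold pvStep; simp only []
  rw [if_pos (step_window_iff.mpr h)]

lemma step_of_not_mem {k : Int} {out : List Char} {c : Char}
    (h : ¬ ∃ i, i < out.length ∧ (out.length : Int) ≤ (i:Int) + k ∧ out[i]? = some c) :
    pvStep k out c = out ++ [c] := by
  unfold pvStep; simp only []
  rw [if_neg (fun hm => h (step_window_iff.mp hm))]

-- B's fold only ever appends: the accumulator stays a prefix, growing by at most |cs|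
lemma fold_ext (k : Int) (cs : List Char) : ∀ out : List Char,
    ∃ ext, List.foldl (pvStep k) out cs = out ++ ext ∧ ext.length ≤ cs.length := by
  induction cs with
  | nil => exact fun out => ⟨[], by simp⟩
  | cons c cs ih =>
      intro out
      by_cases h : ∃ i, i < out.length ∧ (out.length : Int) ≤ (i:Int) + k ∧ out[i]? = some c
      · obtain ⟨ext, he, hl⟩ := ih out
        exact ⟨ext, by simpa [step_of_mem h] using he, by simpa using Nat.le_succ_of_le hl⟩
      · obtain ⟨ext, he, hl⟩ := ih (out ++ [c])
        exact ⟨c :: ext, by simpa [step_of_not_mem h] using he, by simpa using hl⟩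

-- on a prefix with no equal pair within distance k, B's pass keeps every character
lemma fold_take_eq {k : Int} {lst : List Char} : ∀ L : Nat, L ≤ lst.length →
    (∀ i j, i < j → j < L → (j:Int) ≤ (i:Int) + k → lst[i]? ≠ lst[j]?) →
    List.foldl (pvStep k) [] (lst.take L) = lst.take L := by
  intro L
  induction L with
  | zero => simp
  | succ L ih =>
      intro hL hnp
      have hLlen : L < lst.length := by omega
      have htake : lst.take (L+1) = lst.take L ++ [lst[L]] := by
        rw [List.take_add_one]; simp [List.getElem?_eq_getElem hLlen]
      rw [htake, List.foldl_append, ih (by omega) (fun i j h1 h2 => hnp i j h1 (by omega))]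
      simp only [List.foldl_cons, List.foldl_nil]
      rw [step_of_not_mem, ← htake]
      rintro ⟨i, hi, hik, hc⟩
      rw [List.length_take, Nat.min_eq_left (by omega)] at hi hik
      rw [List.getElem?_take, if_pos hi] at hc
      exact hnp i L hi (by omega) (by omega)
        (by rw [hc, List.getElem?_eq_getElem hLlen])

-- KEY LEMMA: popping the right element of A's chosen pair does not change B's pass:
-- the left-minimality of (l, r) makes B keep lst[0..l] intact, so lst[r] still sees an
-- equal kept character within its window and would have been skipped by B anyway.
lemma fold_erase {k : Int} {lst : List Char} {l r : Nat}
    (hl : l < lst.length) (hr : r < lst.length) (hlr : l < r) (hrk : (r:Int) ≤ (l:Int) + k)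
    (heq : lst[l]? = lst[r]?)
    (hmin : ∀ i j, i < l → i < j → (j:Int) ≤ (i:Int) + k → j < lst.length → lst[i]? ≠ lst[j]?) :
    List.foldl (pvStep k) [] (lst.eraseIdx r) = List.foldl (pvStep k) [] lst := by
  have hfold1 : List.foldl (pvStep k) [] (lst.take (l+1)) = lst.take (l+1) :=
    fold_take_eq (l+1) (by omega)
      (fun i j h1 h2 h3 => hmin i j (by omega) h1 h3 (by omega))
  have htr : lst.take r = lst.take (l+1) ++ (lst.drop (l+1)).take (r - (l+1)) := by
    conv_lhs => rw [show r = (l+1) + (r - (l+1)) by omega]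
    rw [List.take_add]
  obtain ⟨ext, hext, hextlen⟩ := fold_ext k ((lst.drop (l+1)).take (r - (l+1))) (lst.take (l+1))
  have hOr : List.foldl (pvStep k) [] (lst.take r) = lst.take (l+1) ++ ext := by
    rw [htr, List.foldl_append, hfold1, hext]
  have htl : (lst.take (l+1)).length = l + 1 := by
    rw [List.length_take]; omega
  have hextlen' : ext.length ≤ r - (l+1) :=
    le_trans hextlen (by rw [List.length_take]; exact min_le_left _ _)
  have hOrl : (List.foldl (pvStep k) [] (lst.take r))[l]? = lst[r]? := by
    rw [hOr, List.getElem?_append_left (by omega), List.getElem?_take, if_pos (by omega), heq]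
  have key : pvStep k (List.foldl (pvStep k) [] (lst.take r)) lst[r] =
      List.foldl (pvStep k) [] (lst.take r) := by
    apply step_of_mem
    refine ⟨l, ?_, ?_, ?_⟩
    · rw [hOr, List.length_append, htl]; omega
    · rw [hOr, List.length_append, htl]; omega
    · rw [hOrl, List.getElem?_eq_getElem hr]
  have hsplit : lst = lst.take r ++ lst[r] :: lst.drop (r+1) := by
    conv_lhs => rw [← List.take_append_drop r lst, List.drop_eq_getElem_cons hr]
  rw [List.eraseIdx_eq_take_drop_succ]
  conv_rhs => rw [hsplit]
  rw [List.foldl_append, List.foldl_append, List.foldl_cons, key]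

-- A's fixpoint iteration (with enough fuel) computes exactly B's single pass
lemma loop_eq_fold {k : Int} :
    ∀ (fuel : Nat) (lst : List Char), lst.length < fuel →
      pvLoop k fuel lst = List.foldl (pvStep k) [] lst := by
  intro fuel
  induction fuel with
  | zero => intro lst hlen; omega
  | succ fuel ih =>
      intro lst hlen
      rw [pvLoop]
      cases hf : pvFind k lst 0 lst.length with
      | none =>
          have h2 := fold_take_eq (lst := lst) lst.length le_rfl
            (fun i j h1 h2 h3 => find_none (by omega) hf i j (Nat.zero_le _) (by omega) h1 h3 h2)
          rw [List.take_length] at h2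
          exact h2.symm
      | some t =>
          obtain ⟨l, r, _, hl, hlr, hr, hrk, heq, hminL, hminR, ht⟩ := find_some (by omega) hf
          have hlt : t.length < lst.length := by
            rw [ht, List.length_eraseIdx_of_lt hr]; omega
          show pvLoop k fuel t = List.foldl (pvStep k) [] lst
          rw [ih t (by omega), ht]
          exact fold_erase hl hr hlr hrk heq
            (fun i j hi => hminL i j (Nat.zero_le _) hi)

-- ===== VERDICT (by name: the statement is the Claim_ definition above) =====
theorem mergeCharacters_spec : Claim_equal_mergeCharacters := by
  intro s k _
  unfold Spec_mergeCharacters mergeCharacters mergeCharacters_alt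
  rw [loop_eq_fold _ _ (by omega)]
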